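-- pv_equiv track=rewrite | github.com/pypi-data/pypi-mirror-385 | packages/rclone-adapter/rclone_adapter-0.2.0.tar.gz/rclone_adapter-0.2.0/generate.py | generate_option_model
-- ===== SOURCE A (Python) =====
-- def clean_flag_name(flag: str) -> str:
--     """Convert flag name to valid Python identifier."""
--     # Remove -- prefix and convert to snake_case
--     name = flag.lstrip("-").replace("-", "_")
--     # Handle special cases
--     if not name:
--         return "flag"
--     if name[0].isdigit():
--         name = f"flag_{name}"
--     return name
--
-- def infer_flag_type(flag: str, description: str) -> str:
--     """Infer the type of a flag from its name and description."""
--     flag_lower = flag.lower()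
--     desc_lower = description.lower()
--
--     # Boolean flags (no value)
--     if not "=" in flag and not any(
--         x in desc_lower for x in ["number", "size", "count", "duration", "time"]
--     ):
--         return "bool"
--
--     # Integer types
--     if any(x in desc_lower for x in ["number", "count", "int"]):
--         return "int"
--
--     # Size types
--     if any(x in desc_lower for x in ["size", "bytes"]):
--         return "int"  # Size in bytes
--
--     # Duration/time types
--     if any(x in desc_lower for x in ["duration", "time", "seconds", "timeout"]):
--         return "float"
--
--     # Default to string
--     return "str"
--
-- def generate_option_model(command: str, flags: list[dict]) -> str:
--     """Generate Pydantic model for a command's options."""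
--     class_name = f"{command.capitalize()}Options"
--     lines = [
--         f"class {class_name}(BaseModel):",
--         f'    """Options for the \'rclone {command}\' command."""',
--         "",
--     ]
--
--     # Group flags by type for better organization
--     bool_flags = []
--     other_flags = []
--
--     for flag_info in flags:
--         flag = flag_info["flag"]
--         description = flag_info["description"]
--
--         # Skip if it's just showing shorthand like "-h, --help"
--         if flag == "-h," or "help for" in description:
--             continue
--
--         # Extract the actual flag name (handle "-h, --help" format)
--         if "," in flag:
--             parts = flag.split(",")
--             flag = parts[-1].strip()  # Use the long form
--
--         flag_name = clean_flag_name(flag)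
--         flag_type = infer_flag_type(flag, description)
--
--         # Escape quotes in description
--         description = description.replace('"', '\\"')
--
--         if flag_type == "bool":
--             bool_flags.append((flag_name, description, flag))
--         else:
--             other_flags.append((flag_name, description, flag, flag_type))
--
--     # Add boolean flags first
--     for flag_name, description, orig_flag in bool_flags:
--         lines.append(
--             f'    {flag_name}: bool = Field(False, description="{description}")'
--         )
--
--     # Add other flags
--     for flag_name, description, orig_flag, flag_type in other_flags:
--         if flag_type == "str":
--             default = '""'
--         elif flag_type == "int":
--             default = "0"
--         elif flag_type == "float":
--             default = "0.0"
--         else: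
--             default = "None"
--
--         lines.append(
--             f'    {flag_name}: {flag_type} | None = Field({default}, description="{description}")'
--         )
--
--     # If no fields, add a pass statement
--     if len(lines) == 3:
--         lines.append("    pass")
--
--     return "\n".join(lines)
-- ===== SOURCE B (Python) =====
-- def clean_flag_name(flag: str) -> str:
--     """Convert flag name to valid Python identifier."""
--     name = flag.lstrip("-").replace("-", "_")
--     if not name:
--         return "flag"
--     if name[0].isdigit():
--         name = f"flag_{name}"
--     return name
--
-- def infer_flag_type(flag: str, description: str) -> str:
--     """Infer the type of a flag from its name and description."""
--     desc_lower = description.lower()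
--     if not "=" in flag and not any(
--         x in desc_lower for x in ["number", "size", "count", "duration", "time"]
--     ):
--         return "bool"
--     if any(x in desc_lower for x in ["number", "count", "int"]):
--         return "int"
--     if any(x in desc_lower for x in ["size", "bytes"]):
--         return "int"
--     if any(x in desc_lower for x in ["duration", "time", "seconds", "timeout"]):
--         return "float"
--     return "str"
--
-- _DEFAULTS = {"str": '""', "int": "0", "float": "0.0"}
--
-- def _make_record(flag_info):
--     """One flag dict -> (field_name, field_type, escaped_description), or None to skip."""
--     flag = flag_info["flag"]
--     description = flag_info["description"]
--     if flag == "-h," or "help for" in description: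
--         return None
--     if "," in flag:
--         flag = flag.split(",")[-1].strip()
--     return (
--         clean_flag_name(flag),
--         infer_flag_type(flag, description),
--         description.replace('"', '\\"'),
--     )
--
-- def _emit(record):
--     name, ftype, desc = record
--     if ftype == "bool":
--         return f'    {name}: bool = Field(False, description="{desc}")'
--     default = _DEFAULTS.get(ftype, "None")
--     return f'    {name}: {ftype} | None = Field({default}, description="{desc}")'
--
-- def generate_option_model(command: str, flags: list[dict]) -> str:
--     """Generate Pydantic model for a command's options."""
--     lines = [
--         f"class {command.capitalize()}Options(BaseModel):",
--         f'    """Options for the \'rclone {command}\' command."""',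
--         "",
--     ]
--     records = [r for r in map(_make_record, flags) if r is not None]
--     # stable sort: bool fields first, original order otherwise preserved
--     lines.extend(_emit(r) for r in sorted(records, key=lambda r: r[1] != "bool"))
--     if not records:
--         lines.append("    pass")
--     return "\n".join(lines)
-- ===== Notes on version B (the rewrite author's own statement) =====
-- stated objective: alternative
-- what changed: Replaces A's two-accumulator partition followed by two separate emission loops with a single filter-map pass building (name, type, description) records, then one stable sort by 'type is not bool' and one unified emission loop; the trailing 'pass' is decided from the record list being empty instead of len(lines)==3.
import Mathlib
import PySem

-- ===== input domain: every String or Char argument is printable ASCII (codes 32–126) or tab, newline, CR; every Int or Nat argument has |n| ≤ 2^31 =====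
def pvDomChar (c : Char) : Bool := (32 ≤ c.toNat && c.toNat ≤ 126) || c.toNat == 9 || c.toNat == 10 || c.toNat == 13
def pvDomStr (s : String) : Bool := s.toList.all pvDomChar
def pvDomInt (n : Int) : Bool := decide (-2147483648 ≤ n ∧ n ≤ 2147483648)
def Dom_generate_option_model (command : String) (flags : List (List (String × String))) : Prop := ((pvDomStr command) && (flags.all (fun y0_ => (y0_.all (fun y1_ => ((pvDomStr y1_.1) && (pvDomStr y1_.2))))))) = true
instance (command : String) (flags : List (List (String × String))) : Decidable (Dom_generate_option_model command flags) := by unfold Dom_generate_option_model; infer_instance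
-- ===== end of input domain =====

-- B replaces A's two-accumulator partition + two emission loops by one filter-map pass into
-- records, a stable sort by "type ≠ bool" and one unified emission loop (objective: alternative).

-- ===== PORT A =====
-- shared module helpers (both Pythons use them verbatim)

-- dict[k]: first-match association-list lookup; "" outside Pre_ (Python raises KeyError there)
def pvLookup (d : List (String × String)) (k : String) : String :=
  ((d.find? (fun p => p.1 == k)).map (·.2)).getD ""

-- str.capitalize(): first char upper, rest lower (exact on the ASCII domain)
def pvCapitalize (s : String) : String :=
  match s.toList with
  | [] => ""
  | c :: rest => String.ofList (PySem.Chars.upperChar c :: PySem.Chars.lower rest)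

-- flag.lstrip("-"): drop leading '-' (exact: single-character strip set)
def pvLstripDash (s : String) : String := String.ofList (s.toList.dropWhile (fun c => c == '-'))

def clean_flag_name (flag : String) : String :=
  let name := PySem.Str.replace (pvLstripDash flag) "-" "_"
  if name == "" then "flag"
  else if ((name.toList.head?.map PySem.Chars.isdigit).getD false) then "flag_" ++ name
  else name

-- (Python's unused local flag_lower is dropped)
def infer_flag_type (flag : String) (description : String) : String :=
  let desc_lower := PySem.Str.lower description
  if !(PySem.Str.isIn "=" flag)
      && !(["number", "size", "count", "duration", "time"].any (fun x => PySem.Str.isIn x desc_lower)) then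
    "bool"
  else if ["number", "count", "int"].any (fun x => PySem.Str.isIn x desc_lower) then "int"
  else if ["size", "bytes"].any (fun x => PySem.Str.isIn x desc_lower) then "int"
  else if ["duration", "time", "seconds", "timeout"].any (fun x => PySem.Str.isIn x desc_lower) then "float"
  else "str"

-- A-side: one loop filling bool_flags/other_flags, then two emission loops
def pvStepA (st : List (String × String × String) × List (String × String × String × String))
    (flag_info : List (String × String)) :
    List (String × String × String) × List (String × String × String × String) :=
  let flag := pvLookup flag_info "flag"
  let description := pvLookup flag_info "description"
  if flag == "-h," || PySem.Str.isIn "help for" description then st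
  else
    let flag := if PySem.Str.isIn "," flag then
        let parts := (PySem.Str.split? flag ",").getD []
        PySem.Str.strip ((PySem.List.pyGet? parts (-1)).getD "")
      else flag
    let flag_name := clean_flag_name flag
    let flag_type := infer_flag_type flag description
    let description := PySem.Str.replace description "\"" "\\\""
    if flag_type == "bool" then (st.1 ++ [(flag_name, description, flag)], st.2)
    else (st.1, st.2 ++ [(flag_name, description, flag, flag_type)])

def pvBoolLine (t : String × String × String) : String :=
  "    " ++ t.1 ++ ": bool = Field(False, description=\"" ++ t.2.1 ++ "\")"

def pvOtherLine (t : String × String × String × String) : String :=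
  let default := if t.2.2.2 == "str" then "\"\""
    else if t.2.2.2 == "int" then "0"
    else if t.2.2.2 == "float" then "0.0"
    else "None"
  "    " ++ t.1 ++ ": " ++ t.2.2.2 ++ " | None = Field(" ++ default ++ ", description=\"" ++ t.2.1 ++ "\")"

def generate_option_model (command : String) (flags : List (List (String × String))) : String :=
  let class_name := pvCapitalize command ++ "Options"
  let lines : List String :=
    ["class " ++ class_name ++ "(BaseModel):",
     "    \"\"\"Options for the 'rclone " ++ command ++ "' command.\"\"\"",
     ""]
  let st := flags.foldl pvStepA ([], [])
  let lines := lines ++ st.1.map pvBoolLine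
  let lines := lines ++ st.2.map pvOtherLine
  let lines := if lines.length == 3 then lines ++ ["    pass"] else lines
  PySem.Str.join "\n" lines

-- ===== PORT B =====
-- _make_record: one flag dict -> (name, type, escaped description), none to skip
def pvRecord? (flag_info : List (String × String)) : Option (String × String × String) :=
  let flag := pvLookup flag_info "flag"
  let description := pvLookup flag_info "description"
  if flag == "-h," || PySem.Str.isIn "help for" description then none
  else
    let flag := if PySem.Str.isIn "," flag then
        PySem.Str.strip ((PySem.List.pyGet? ((PySem.Str.split? flag ",").getD []) (-1)).getD "")
      else flag
    some (clean_flag_name flag, infer_flag_type flag description,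
          PySem.Str.replace description "\"" "\\\"")

-- _DEFAULTS.get(ftype, "None"): first-match lookup in the literal dict
def pvDefaultFor (t : String) : String :=
  ((([("str", "\"\""), ("int", "0"), ("float", "0.0")].find? (fun p => p.1 == t)).map (·.2)).getD "None")

def pvEmit (r : String × String × String) : String :=
  if r.2.1 == "bool" then
    "    " ++ r.1 ++ ": bool = Field(False, description=\"" ++ r.2.2 ++ "\")"
  else
    "    " ++ r.1 ++ ": " ++ r.2.1 ++ " | None = Field(" ++ pvDefaultFor r.2.1 ++ ", description=\"" ++ r.2.2 ++ "\")"

def generate_option_model_alt (command : String) (flags : List (List (String × String))) : String :=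
  let lines : List String :=
    ["class " ++ (pvCapitalize command ++ "Options") ++ "(BaseModel):",
     "    \"\"\"Options for the 'rclone " ++ command ++ "' command.\"\"\"",
     ""]
  let records := flags.filterMap pvRecord?
  let lines := lines ++
    (PySem.List.sorted records (fun r => if r.2.1 != "bool" then (1 : Int) else 0) false).map pvEmit
  let lines := if records.isEmpty then lines ++ ["    pass"] else lines
  PySem.Str.join "\n" lines

-- ===== PRECONDITION & SPEC =====
-- Pre_ excludes exactly the inputs where Python A raises KeyError: a flag dict missing "flag" or "description".
def Pre_generate_option_model (command : String) (flags : List (List (String × String))) : Prop :=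
  ∀ fi ∈ flags, (fi.any (fun p => p.1 == "flag")) = true ∧ (fi.any (fun p => p.1 == "description")) = true
instance (command : String) (flags : List (List (String × String))) : Decidable (Pre_generate_option_model command flags) := by unfold Pre_generate_option_model; infer_instance

def pvWitness_generate_option_model : String × (List (List (String × String))) :=
  ("copy", [[("flag", "--dry-run"), ("description", "do a trial run")]])

def Spec_generate_option_model (command : String) (flags : List (List (String × String))) (out : String) : Prop := out = generate_option_model_alt command flags
instance (command : String) (flags : List (List (String × String))) (out : String) : Decidable (Spec_generate_option_model command flags out) := by unfold Spec_generate_option_model; infer_instance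

-- ===== CLAIM (what is proved, stated in full; the proofs are below) =====
def Claim_equal_generate_option_model : Prop := ∀ (command : String) (flags : List (List (String × String))), Dom_generate_option_model command flags → Pre_generate_option_model command flags → Spec_generate_option_model command flags (generate_option_model command flags)

-- ===== LEMMAS AND PROOFS =====

-- the record's bool test
def pvIsBool (r : String × String × String) : Bool := r.2.1 == "bool"

-- a stable sort by the two-valued key 0/1 is "the 0s, then the 1s, order preserved"
theorem pv_insertBy_two {α : Type} (p : α → Bool) (x : α) (B O : List α)
    (hB : ∀ b ∈ B, p b = true) (hO : ∀ o ∈ O, p o = false) :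
    PySem.List.insertBy
        (fun a b => decide ((if p a then (0 : Int) else 1) < (if p b then (0 : Int) else 1)))
        x (B ++ O)
      = if p x then B ++ x :: O else B ++ (O ++ [x]) := by
  induction B with
  | nil =>
    simp only [List.nil_append]
    induction O with
    | nil => cases hpx : p x <;> simp [PySem.List.insertBy, hpx]
    | cons o O' ihO =>
      have hpo : p o = false := hO o (by simp)
      cases hpx : p x <;>
        simp [PySem.List.insertBy, hpx, hpo, ihO (fun a ha => hO a (by simp [ha]))]
  | cons b B' ihB =>
    have hpb : p b = true := hB b (by simp)
    cases hpx : p x <;>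
      simp [PySem.List.insertBy, hpx, hpb, ihB (fun a ha => hB a (by simp [ha]))]

theorem pv_sorted_partition {α : Type} (p : α → Bool) (xs : List α) :
    PySem.List.sorted xs (fun x => if p x then (0 : Int) else 1) false
      = xs.filter p ++ xs.filter (fun x => !p x) := by
  rw [PySem.List.sorted_eq_foldl_insertBy]
  suffices h : ∀ (l : List α) (B O : List α), (∀ b ∈ B, p b = true) → (∀ o ∈ O, p o = false) →
      l.foldl (fun acc x => PySem.List.insertBy
          (fun a b => decide ((if p a then (0 : Int) else 1) < (if p b then (0 : Int) else 1))) x acc)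
        (B ++ O)
      = (B ++ l.filter p) ++ (O ++ l.filter (fun x => !p x)) by
    have := h xs [] [] (by simp) (by simp)
    simpa using this
  intro l
  induction l with
  | nil => intro B O _ _; simp
  | cons x l ih =>
    intro B O hB hO
    simp only [List.foldl_cons]
    rw [pv_insertBy_two p x B O hB hO]
    by_cases hpx : p x = true
    · rw [if_pos hpx]
      have hx2 : B ++ x :: O = (B ++ [x]) ++ O := by simp
      rw [hx2, ih (B ++ [x]) O
        (fun b hb => (List.mem_append.mp hb).elim (hB b)
          (fun h => by simp only [List.mem_singleton] at h; subst h; exact hpx)) hO]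
      simp [hpx]
    · have hpx' : p x = false := by simpa using hpx
      rw [if_neg hpx]
      rw [ih B (O ++ [x]) hB
        (fun o ho => (List.mem_append.mp ho).elim (hO o)
          (fun h => by simp only [List.mem_singleton] at h; subst h; exact hpx'))]
      simp [hpx']

-- the two keys (B's literal one and the 0/1 one used above) agree
theorem pv_key_eq :
    (fun (r : String × String × String) => if r.2.1 != "bool" then (1 : Int) else 0)
      = (fun r => if pvIsBool r then (0 : Int) else 1) := by
  funext r
  by_cases h : r.2.1 = "bool" <;> simp [pvIsBool, h]

-- B's dict .get equals A's chained-if default choice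
theorem pv_default_eq (t : String) :
    pvDefaultFor t
      = (if t == "str" then "\"\"" else if t == "int" then "0"
         else if t == "float" then "0.0" else "None") := by
  unfold pvDefaultFor
  simp only [List.find?]
  by_cases h1 : t = "str"
  · subst h1; rfl
  · rw [beq_false_of_ne (fun h => h1 h.symm), beq_false_of_ne h1]
    by_cases h2 : t = "int"
    · subst h2; rfl
    · rw [beq_false_of_ne (fun h => h2 h.symm), beq_false_of_ne h2]
      by_cases h3 : t = "float"
      · subst h3; rfl
      · rw [beq_false_of_ne (fun h => h3 h.symm), beq_false_of_ne h3]
        rfl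

theorem pv_emit_bool (c d fl t : String) (h : (t == "bool") = true) :
    pvEmit (c, t, d) = pvBoolLine (c, d, fl) := by
  have ht : t = "bool" := by simpa using h
  subst ht; rfl

theorem pv_emit_other (c d fl t : String) (h : (t == "bool") = false) :
    pvEmit (c, t, d) = pvOtherLine (c, d, fl, t) := by
  unfold pvEmit pvOtherLine
  rw [pv_default_eq]
  rw [if_neg (by simp [h])]

theorem pv_stepA_fst (st : List (String × String × String) × List (String × String × String × String))
    (fi : List (String × String)) :
    (pvStepA st fi).1.map pvBoolLine
      = st.1.map pvBoolLine
        ++ (match pvRecord? fi with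
            | none => []
            | some r => if pvIsBool r then [pvEmit r] else []) := by
  unfold pvStepA pvRecord?
  set f := pvLookup fi "flag" with hf
  set d := pvLookup fi "description" with hd
  clear_value f d
  by_cases hskip : (f == "-h," || PySem.Str.isIn "help for" d) = true
  · rw [if_pos hskip, if_pos hskip]; simp
  · rw [if_neg hskip, if_neg hskip]
    simp only []
    set fl := if PySem.Str.isIn "," f = true then
        PySem.Str.strip ((PySem.List.pyGet? ((PySem.Str.split? f ",").getD []) (-1)).getD "") else f with hfl
    set t := infer_flag_type fl d with ht
    set d2 := PySem.Str.replace d "\"" "\\\"" with hd2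
    clear_value fl t d2
    by_cases hb : (t == "bool") = true
    · rw [if_pos hb]
      rw [if_pos (show pvIsBool (clean_flag_name fl, t, d2) = true from hb)]
      simp only [List.map_append, List.map_cons, List.map_nil]
      rw [pv_emit_bool _ _ fl _ hb]
    · rw [if_neg hb]
      rw [if_neg (show ¬ pvIsBool (clean_flag_name fl, t, d2) = true from hb)]
      simp only [List.map_append, List.map_cons, List.map_nil, List.append_nil]

theorem pv_stepA_snd (st : List (String × String × String) × List (String × String × String × String))
    (fi : List (String × String)) :
    (pvStepA st fi).2.map pvOtherLine
      = st.2.map pvOtherLine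
        ++ (match pvRecord? fi with
            | none => []
            | some r => if pvIsBool r then [] else [pvEmit r]) := by
  unfold pvStepA pvRecord?
  set f := pvLookup fi "flag" with hf
  set d := pvLookup fi "description" with hd
  clear_value f d
  by_cases hskip : (f == "-h," || PySem.Str.isIn "help for" d) = true
  · rw [if_pos hskip, if_pos hskip]; simp
  · rw [if_neg hskip, if_neg hskip]
    simp only []
    set fl := if PySem.Str.isIn "," f = true then
        PySem.Str.strip ((PySem.List.pyGet? ((PySem.Str.split? f ",").getD []) (-1)).getD "") else f with hfl
    set t := infer_flag_type fl d with ht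
    set d2 := PySem.Str.replace d "\"" "\\\"" with hd2
    clear_value fl t d2
    by_cases hb : (t == "bool") = true
    · rw [if_pos hb]
      rw [if_pos (show pvIsBool (clean_flag_name fl, t, d2) = true from hb)]
      simp only [List.append_nil]
    · rw [if_neg hb]
      rw [if_neg (show ¬ pvIsBool (clean_flag_name fl, t, d2) = true from hb)]
      simp only [List.map_append, List.map_cons, List.map_nil]
      rw [pv_emit_other _ _ fl _ (eq_false_of_ne_true hb)]

theorem pv_foldl_stepA (flags : List (List (String × String)))
    (st : List (String × String × String) × List (String × String × String × String)) :
    (flags.foldl pvStepA st).1.map pvBoolLine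
        = st.1.map pvBoolLine ++ ((flags.filterMap pvRecord?).filter pvIsBool).map pvEmit
      ∧ (flags.foldl pvStepA st).2.map pvOtherLine
        = st.2.map pvOtherLine ++ ((flags.filterMap pvRecord?).filter (fun r => !pvIsBool r)).map pvEmit := by
  induction flags generalizing st with
  | nil => simp
  | cons fi rest ih =>
    simp only [List.foldl_cons, List.filterMap_cons]
    obtain ⟨ih1, ih2⟩ := ih (pvStepA st fi)
    constructor
    · rw [ih1, pv_stepA_fst]
      cases hrec : pvRecord? fi with
      | none => simp
      | some r => cases hb : pvIsBool r <;> simp [hb]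
    · rw [ih2, pv_stepA_snd]
      cases hrec : pvRecord? fi with
      | none => simp
      | some r => cases hb : pvIsBool r <;> simp [hb]

-- ===== VERDICT (by name: the statement is the Claim_ definition above) =====
theorem generate_option_model_spec : Claim_equal_generate_option_model := by
  intro command flags _ _
  unfold Spec_generate_option_model generate_option_model generate_option_model_alt
  simp only []
  obtain ⟨h1, h2⟩ := pv_foldl_stepA flags ([], [])
  simp only [List.map_nil, List.nil_append] at h1 h2
  have hkey : PySem.List.sorted (flags.filterMap pvRecord?)
        (fun r => if r.2.1 != "bool" then (1 : Int) else 0) false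
      = (flags.filterMap pvRecord?).filter pvIsBool
        ++ (flags.filterMap pvRecord?).filter (fun r => !pvIsBool r) := by
    rw [pv_key_eq, pv_sorted_partition]
  rw [hkey, h1, h2]
  cases hrec : flags.filterMap pvRecord? with
  | nil => simp
  | cons r rs =>
    have hlen : ((r :: rs).filter pvIsBool).length
        + ((r :: rs).filter (fun x => !pvIsBool x)).length = (r :: rs).length :=
      (List.length_eq_length_filter_add _).symm
    simp only [List.map_append, List.length_append, List.length_map, List.length_cons] at hlen ⊢
    rw [if_neg (by simp; omega), if_neg (by simp)]
    simp
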